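-- pv_equiv track=rewrite | github.com/FEniCS/dolfinx | utils/pylit/pylit.py | collect_blocks
-- ===== SOURCE A (Python) =====
-- def collect_blocks(lines):
--     """collect lines in a list
--
--     yield list for each paragraph, i.e. block of lines separated by a
--     blank line (whitespace only).
--
--     Trailing blank lines are collected as well.
--     """
--     blank_line_reached = False
--     block = []
--     for line in lines:
--         if blank_line_reached and line.rstrip():
--             yield block
--             blank_line_reached = False
--             block = [line]
--             continue
--         if not line.rstrip():
--             blank_line_reached = True
--         block.append(line)
--     yield block
-- ===== SOURCE B (Python) =====
-- def collect_blocks(lines):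
--     """collect lines in a list
--
--     yield list for each paragraph, i.e. block of lines separated by a
--     blank line (whitespace only).
--
--     Trailing blank lines are collected as well.
--     """
--     ls = list(lines)
--     starts = [0]
--     seen_blank = False
--     for i, line in enumerate(ls):
--         if line.rstrip():
--             if seen_blank:
--                 starts.append(i)
--                 seen_blank = False
--         else:
--             seen_blank = True
--     for a, b in zip(starts, starts[1:] + [len(ls)]):
--         yield ls[a:b]
-- ===== Notes on version B (the rewrite author's own statement) =====
-- stated objective: alternative
-- what changed: B replaces A's single-pass state machine that accumulates the current block and yields it on transitions by a two-phase algorithm: one pass computes the list of block-start indices, then blocks are produced by slicing the materialized list between consecutive start indices.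
import Mathlib
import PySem

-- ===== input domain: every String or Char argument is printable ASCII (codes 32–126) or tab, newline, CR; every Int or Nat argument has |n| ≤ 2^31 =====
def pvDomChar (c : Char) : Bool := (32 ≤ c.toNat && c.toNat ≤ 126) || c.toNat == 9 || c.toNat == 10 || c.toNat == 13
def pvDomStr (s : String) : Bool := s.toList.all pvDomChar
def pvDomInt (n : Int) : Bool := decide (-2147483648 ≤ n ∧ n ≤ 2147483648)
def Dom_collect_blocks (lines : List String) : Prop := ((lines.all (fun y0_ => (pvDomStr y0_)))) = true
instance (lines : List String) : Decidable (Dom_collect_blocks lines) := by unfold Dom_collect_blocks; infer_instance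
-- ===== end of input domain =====

-- B produces the same blocks by a two-phase index computation + slicing instead of A's
-- accumulating state machine; objective: alternative (same cost, different decomposition).

-- ===== PORT A =====
-- the generator's loop: state = (blank_line_reached, block, yielded blocks); final yield appended
def pvArun : List String → Bool → List String → List (List String) → List (List String)
  | [], _, block, out => out ++ [block]
  | l :: rest, blank, block, out =>
    if blank && (PySem.Str.rstrip l != "") then
      pvArun rest false [l] (out ++ [block])
    else if PySem.Str.rstrip l == "" then
      pvArun rest true (block ++ [l]) out
    else
      pvArun rest blank (block ++ [l]) out

def collect_blocks (lines : List String) : List (List String) :=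
  pvArun lines false [] []

-- ===== PORT B =====
-- first pass of Source B: for i, line in enumerate(ls): collect block-start indices
def pvBstarts : List String → Nat → Bool → List Nat → List Nat
  | [], _, _, starts => starts
  | l :: rest, i, seen, starts =>
    if PySem.Str.rstrip l != "" then
      if seen then pvBstarts rest (i + 1) false (starts ++ [i])
      else pvBstarts rest (i + 1) seen starts
    else pvBstarts rest (i + 1) true starts

-- second pass of Source B: zip(starts, starts[1:] + [len(ls)]) and slice
def collect_blocks_alt (lines : List String) : List (List String) :=
  let starts := pvBstarts lines 0 false [0]
  (starts.zip (starts.tail ++ [lines.length])).map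
    (fun ab => PySem.List.slice lines (some (ab.1 : Int)) (some (ab.2 : Int)))

-- ===== PRECONDITION & SPEC =====
def Spec_collect_blocks (lines : List String) (out : List (List String)) : Prop := out = collect_blocks_alt lines
instance (lines : List String) (out : List (List String)) : Decidable (Spec_collect_blocks lines out) := by unfold Spec_collect_blocks; infer_instance

-- ===== CLAIM (what is proved, stated in full; the proofs are below) =====
def Claim_equal_collect_blocks : Prop := ∀ (lines : List String), Dom_collect_blocks lines → Spec_collect_blocks lines (collect_blocks lines)

-- ===== LEMMAS AND PROOFS =====

-- segments of `full` between consecutive start indices; the last segment runs to the end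
def pvSegs (full : List String) : List Nat → List (List String)
  | [] => []
  | [a] => [(full.drop a).take (full.length - a)]
  | a :: b :: r => (full.drop a).take (b - a) :: pvSegs full (b :: r)

-- like pvSegs but without the final open segment
def pvSegsInit (full : List String) : List Nat → List (List String)
  | [] => []
  | [_] => []
  | a :: b :: r => (full.drop a).take (b - a) :: pvSegsInit full (b :: r)

lemma pvSegsInit_append_last (full : List String) (s : List Nat) (a j : Nat) :
    pvSegsInit full (s ++ [a, j]) = pvSegsInit full (s ++ [a]) ++ [(full.drop a).take (j - a)] := by
  induction s with
  | nil => simp [pvSegsInit]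
  | cons x s ih =>
    cases s with
    | nil => simp [pvSegsInit]
    | cons y t => simpa [pvSegsInit] using ih

lemma pvSegs_eq_init_append (full : List String) (s : List Nat) (a : Nat) :
    pvSegs full (s ++ [a]) =
      pvSegsInit full (s ++ [a]) ++ [(full.drop a).take (full.length - a)] := by
  induction s with
  | nil => simp [pvSegs, pvSegsInit]
  | cons x s ih =>
    cases s with
    | nil => simp [pvSegs, pvSegsInit]
    | cons y t => simpa [pvSegs, pvSegsInit] using ih

lemma pvZipMap_eq_segs (full : List String) (ns : List Nat) (hne : ns ≠ []) :
    (ns.zip (ns.tail ++ [full.length])).map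
        (fun ab => PySem.List.slice full (some (ab.1 : Int)) (some (ab.2 : Int)))
      = pvSegs full ns := by
  induction ns with
  | nil => exact absurd rfl hne
  | cons a ns ih =>
    cases ns with
    | nil => simp [pvSegs, PySem.List.slice_natCast]
    | cons b r =>
      simpa [pvSegs, PySem.List.slice_natCast] using ih (by simp)

lemma pvBstarts_shape (rest : List String) (j : Nat) (seen : Bool) (s : List Nat) (a : Nat) :
    ∃ s' a', pvBstarts rest j seen (s ++ [a]) = s' ++ [a'] := by
  induction rest generalizing j seen s a with
  | nil => exact ⟨s, a, rfl⟩
  | cons l rest ih =>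
    simp only [pvBstarts]
    split
    · split
      · simpa using ih (j + 1) false (s ++ [a]) j
      · exact ih (j + 1) seen s a
    · exact ih (j + 1) true s a

lemma pvBlock_snoc (full : List String) (a j : Nat) (l : String) (rest' : List String)
    (haj : a ≤ j) (hdrop : full.drop j = l :: rest') :
    (full.drop a).take (j - a) ++ [l] = (full.drop a).take (j + 1 - a) := by
  have h1 : j + 1 - a = (j - a) + 1 := by omega
  have h2 : (full.drop a).drop (j - a) = l :: rest' := by
    rw [List.drop_drop]
    have h3 : a + (j - a) = j := by omega
    rw [h3, hdrop]
  rw [h1, List.take_add, h2]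
  simp

lemma pvMain (full : List String) (rest : List String) :
    ∀ (j : Nat) (blank : Bool) (s : List Nat) (a : Nat),
      full.drop j = rest → a ≤ j →
      pvArun rest blank ((full.drop a).take (j - a)) (pvSegsInit full (s ++ [a]))
        = pvSegs full (pvBstarts rest j blank (s ++ [a])) := by
  induction rest with
  | nil =>
    intro j blank s a hdrop haj
    have hlen : full.length ≤ j := by
      by_contra h
      have := List.drop_eq_nil_iff.mp hdrop
      omega
    have hlen2 : (full.drop a).length ≤ j - a := by
      simp only [List.length_drop]; omega
    have hlen3 : (full.drop a).length ≤ full.length - a := by simp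
    rw [pvArun, pvBstarts, pvSegs_eq_init_append,
        List.take_of_length_le hlen2, List.take_of_length_le hlen3]
  | cons l rest ih =>
    intro j blank s a hdrop haj
    have hjlt : j < full.length := by
      by_contra h
      have : full.drop j = [] := List.drop_eq_nil_iff.mpr (by omega)
      simp [this] at hdrop
    have hdrop' : full.drop (j + 1) = rest := by
      have : full.drop (j + 1) = (full.drop j).drop 1 := by
        rw [List.drop_drop]
      rw [this, hdrop]; rfl
    by_cases hb : PySem.Str.rstrip l = ""
    · -- blank line: A appends to block, sets blank := true; B sets seen := true
      simp only [pvArun, pvBstarts]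
      simpa [hb, pvBlock_snoc full a j l rest haj hdrop] using
        ih (j + 1) true s a hdrop' (by omega)
    · -- non-blank line
      cases blank with
      | true =>
        -- start of a new block
        simp only [pvArun, pvBstarts]
        simp [hb]
        rw [← pvSegsInit_append_last full s a j,
            show [l] = (full.drop j).take (j + 1 - j) from by rw [hdrop]; simp]
        simpa using ih (j + 1) false (s ++ [a]) j hdrop' (by omega)
      | false =>
        simp only [pvArun, pvBstarts]
        simpa [hb, pvBlock_snoc full a j l rest haj hdrop] using
          ih (j + 1) false s a hdrop' (by omega)

-- ===== VERDICT (by name: the statement is the Claim_ definition above) =====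
theorem collect_blocks_spec : Claim_equal_collect_blocks := by
  intro lines _
  unfold Spec_collect_blocks collect_blocks collect_blocks_alt
  obtain ⟨s', a', hshape⟩ := pvBstarts_shape lines 0 false [] 0
  have hmain := pvMain lines lines 0 false [] 0 (by simp) (le_refl 0)
  simp only [List.nil_append] at hshape hmain ⊢
  rw [pvZipMap_eq_segs lines _ (by rw [hshape]; simp)]
  have : pvArun lines false ((lines.drop 0).take 0) (pvSegsInit lines [0]) =
      pvArun lines false [] [] := by simp [pvSegsInit]
  rw [← this, hmain]
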